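-- pv_equiv track=rewrite | github.com/thisisadityapatel/AoC | 2024/day8/task2.py | get_antonode_positions
-- ===== SOURCE A (Python) =====
-- def is_in_line(pos1, pos2, point):
--     (x1, y1) = pos1
--     (x2, y2) = pos2
--     (x3, y3) = point
--     return (x1 * (y2 - y3) + x2 * (y3 - y1) + x3 * (y1 - y2)) == 0
--
-- def get_antonode_positions(positions, row_count, col_count):
--     antinodes = set()
--     for pi in range(len(positions) - 1):
--         for pj in range(pi + 1, len(positions)):
--             pos1 = positions[pi]
--             pos2 = positions[pj]
--             for i in range(row_count):
--                 for j in range(col_count):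
--                     if pos1[1] == pos2[1]:
--                         if i <= pos1[0] or i >= pos2[0]:
--                             if is_in_line(pos1, pos2, (i, j)):
--                                 antinodes.add((i, j))
--                     else:
--                         if j <= pos1[1] or j >= pos2[1]:
--                             if is_in_line(pos1, pos2, (i, j)):
--                                 antinodes.add((i, j))
--     return antinodes
-- ===== SOURCE B (Python) =====
-- def get_antonode_positions(positions, row_count, col_count):
--     antinodes = set()
--     n = len(positions)
--     for pi in range(n - 1):
--         for pj in range(pi + 1, n):
--             (x1, y1) = positions[pi]
--             (x2, y2) = positions[pj]
--             if y1 == y2: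
--                 if x1 == x2:
--                     # duplicate antenna: every grid cell is collinear and passes the filter
--                     for i in range(row_count):
--                         for j in range(col_count):
--                             antinodes.add((i, j))
--                 else:
--                     # the line is the single column j == y1; row filter i <= x1 or i >= x2
--                     if 0 <= y1 < col_count:
--                         for i in range(row_count):
--                             if i <= x1 or i >= x2:
--                                 antinodes.add((i, y1))
--             elif x1 == x2:
--                 # the line is the single row i == x1; column filter j <= y1 or j >= y2
--                 if 0 <= x1 < row_count:
--                     for j in range(col_count):
--                         if j <= y1 or j >= y2:
--                             antinodes.add((x1, j))
--             else:
--                 # general line: for each row solve for the unique integer column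
--                 den = x2 - x1
--                 for i in range(row_count):
--                     num = x2 * y1 - x1 * y2 - i * (y1 - y2)
--                     if num % den == 0:
--                         j = num // den
--                         if 0 <= j < col_count and (j <= y1 or j >= y2):
--                             antinodes.add((i, j))
--     return antinodes
-- ===== Notes on version B (the rewrite author's own statement) =====
-- stated objective: faster
-- what changed: Instead of testing every grid cell of the R x C grid against each antenna pair, B cases on the pair's orientation and solves the line equation per row (or walks the single row/column), visiting at most one candidate cell per row, removing the inner column loop.
import Mathlib
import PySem

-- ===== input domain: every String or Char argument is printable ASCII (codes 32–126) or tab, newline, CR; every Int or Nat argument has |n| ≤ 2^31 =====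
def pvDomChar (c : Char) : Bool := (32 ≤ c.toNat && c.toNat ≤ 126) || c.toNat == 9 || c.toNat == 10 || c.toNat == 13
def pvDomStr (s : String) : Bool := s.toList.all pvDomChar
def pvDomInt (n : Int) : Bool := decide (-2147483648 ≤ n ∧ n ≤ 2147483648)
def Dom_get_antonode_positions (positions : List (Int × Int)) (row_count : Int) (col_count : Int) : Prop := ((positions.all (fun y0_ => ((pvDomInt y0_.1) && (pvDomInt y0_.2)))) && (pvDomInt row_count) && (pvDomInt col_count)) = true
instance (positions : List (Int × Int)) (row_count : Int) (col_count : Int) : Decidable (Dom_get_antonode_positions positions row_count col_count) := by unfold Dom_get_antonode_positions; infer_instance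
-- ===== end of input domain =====

-- B replaces A's full-grid scan per antenna pair by solving the line equation per row
-- (at most one integer column candidate per row), removing the inner column loop;
-- same returned set, same insertion order.

-- ===== PORT A =====
def pyIsInLine (pos1 pos2 point : Int × Int) : Bool :=
  (pos1.1 * (pos2.2 - point.2) + pos2.1 * (point.2 - pos1.2) + point.1 * (pos1.2 - pos2.2)) == 0

-- body of A's pair loop: scan the whole grid, testing each cell
def pyAPairLoop (pos1 pos2 : Int × Int) (row_count col_count : Int)
    (ant : PySem.Set (Int × Int)) : PySem.Set (Int × Int) :=
  (PySem.List.pyRange 0 row_count 1).foldl (fun ant i =>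
    (PySem.List.pyRange 0 col_count 1).foldl (fun ant j =>
      if pos1.2 == pos2.2 then
        if i ≤ pos1.1 || i ≥ pos2.1 then
          if pyIsInLine pos1 pos2 (i, j) then PySem.Set.add ant (i, j) else ant
        else ant
      else
        if j ≤ pos1.2 || j ≥ pos2.2 then
          if pyIsInLine pos1 pos2 (i, j) then PySem.Set.add ant (i, j) else ant
        else ant) ant) ant

def get_antonode_positions (positions : List (Int × Int)) (row_count : Int) (col_count : Int) : List (Int × Int) :=
  let n : Int := positions.length
  (PySem.List.pyRange 0 (n - 1) 1).foldl (fun ant pi =>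
    (PySem.List.pyRange (pi + 1) n 1).foldl (fun ant pj =>
      -- pi, pj are in range, so positions[pi]/positions[pj] never raise; default never read
      pyAPairLoop (PySem.List.pyGetD positions pi (0, 0)) (PySem.List.pyGetD positions pj (0, 0))
        row_count col_count ant) ant) PySem.Set.empty

-- ===== PORT B =====
-- body of B's pair loop: case on the line's orientation, one candidate cell per row
def pyBPairLoop (p1 p2 : Int × Int) (row_count col_count : Int)
    (ant : PySem.Set (Int × Int)) : PySem.Set (Int × Int) :=
  if p1.2 == p2.2 then
    if p1.1 == p2.1 then
      -- duplicate antenna: every grid cell is collinear and passes the filter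
      (PySem.List.pyRange 0 row_count 1).foldl (fun ant i =>
        (PySem.List.pyRange 0 col_count 1).foldl (fun ant j =>
          PySem.Set.add ant (i, j)) ant) ant
    else
      -- the line is the single column j == y1; row filter i <= x1 or i >= x2
      if 0 ≤ p1.2 && p1.2 < col_count then
        (PySem.List.pyRange 0 row_count 1).foldl (fun ant i =>
          if i ≤ p1.1 || i ≥ p2.1 then PySem.Set.add ant (i, p1.2) else ant) ant
      else ant
  else
    if p1.1 == p2.1 then
      -- the line is the single row i == x1; column filter j <= y1 or j >= y2
      if 0 ≤ p1.1 && p1.1 < row_count then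
        (PySem.List.pyRange 0 col_count 1).foldl (fun ant j =>
          if j ≤ p1.2 || j ≥ p2.2 then PySem.Set.add ant (p1.1, j) else ant) ant
      else ant
    else
      -- general line: for each row solve the line equation for the unique integer column
      let den := p2.1 - p1.1
      (PySem.List.pyRange 0 row_count 1).foldl (fun ant i =>
        let num := p2.1 * p1.2 - p1.1 * p2.2 - i * (p1.2 - p2.2)
        if PySem.Int.mod num den == 0 then
          let j := PySem.Int.floordiv num den
          if (0 ≤ j && j < col_count) && (j ≤ p1.2 || j ≥ p2.2) then
            PySem.Set.add ant (i, j)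
          else ant
        else ant) ant

def get_antonode_positions_alt (positions : List (Int × Int)) (row_count : Int) (col_count : Int) : List (Int × Int) :=
  let n : Int := positions.length
  (PySem.List.pyRange 0 (n - 1) 1).foldl (fun ant pi =>
    (PySem.List.pyRange (pi + 1) n 1).foldl (fun ant pj =>
      pyBPairLoop (PySem.List.pyGetD positions pi (0, 0)) (PySem.List.pyGetD positions pj (0, 0))
        row_count col_count ant) ant) PySem.Set.empty

-- ===== PRECONDITION & SPEC =====
def Spec_get_antonode_positions (positions : List (Int × Int)) (row_count : Int) (col_count : Int) (out : List (Int × Int)) : Prop := out = get_antonode_positions_alt positions row_count col_count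
instance (positions : List (Int × Int)) (row_count : Int) (col_count : Int) (out : List (Int × Int)) : Decidable (Spec_get_antonode_positions positions row_count col_count out) := by unfold Spec_get_antonode_positions; infer_instance

-- ===== CLAIM (what is proved, stated in full; the proofs are below) =====
def Claim_equal_get_antonode_positions : Prop := ∀ (positions : List (Int × Int)) (row_count : Int) (col_count : Int), Dom_get_antonode_positions positions row_count col_count → Spec_get_antonode_positions positions row_count col_count (get_antonode_positions positions row_count col_count)

-- ===== LEMMAS AND PROOFS =====

-- a fold whose body never matches is the identity
theorem pvFoldlNoMatch {α : Type} (l : List Int) (a : Int) (g : α → α) (s : α)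
    (h : a ∉ l) : l.foldl (fun s i => if i = a then g s else s) s = s := by
  induction l generalizing s with
  | nil => rfl
  | cons b t ih =>
    simp only [List.mem_cons, not_or] at h
    simp only [List.foldl_cons, Ne.symm h.1, if_false]
    exact ih s h.2

-- on a duplicate-free list, a fold whose body fires on exactly one element applies it once
theorem pvFoldlSingle {α : Type} (l : List Int) (a : Int) (g : α → α) (s : α)
    (h : l.Nodup) : l.foldl (fun s i => if i = a then g s else s) s
      = if a ∈ l then g s else s := by
  induction l generalizing s with
  | nil => rfl
  | cons b t ih =>
    rcases List.nodup_cons.mp h with ⟨hb, ht⟩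
    by_cases hba : b = a
    · subst hba
      simp [List.foldl_cons, pvFoldlNoMatch t b g (g s) hb]
    · simp [List.foldl_cons, hba, ih _ ht, Ne.symm hba]

theorem pvFoldlId {α β : Type} (l : List β) (s : α) : l.foldl (fun s _ => s) s = s := by
  induction l generalizing s with
  | nil => rfl
  | cons b t ih => simp only [List.foldl_cons]; exact ih s

theorem pvFoldlAddEqNone {α β : Type} (l : List Int) (y : Int) (f : Int → β) (g : α → β → α) (s : α)
    (h : y ∉ l) : l.foldl (fun s j => if j = y then g s (f j) else s) s = s := by
  induction l generalizing s with
  | nil => rfl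
  | cons b t ih =>
    simp only [List.mem_cons, not_or] at h
    simp only [List.foldl_cons, if_neg (Ne.symm h.1)]
    exact ih s h.2

theorem pvFoldlAddEq {α β : Type} (l : List Int) (y : Int) (f : Int → β) (g : α → β → α) (s : α)
    (h : l.Nodup) : l.foldl (fun s j => if j = y then g s (f j) else s) s
      = if y ∈ l then g s (f y) else s := by
  induction l generalizing s with
  | nil => rfl
  | cons b t ih =>
    rcases List.nodup_cons.mp h with ⟨hb, ht⟩
    by_cases hby : b = y
    · subst hby
      simp [List.foldl_cons, pvFoldlAddEqNone t b f g _ hb]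
    · simp [List.foldl_cons, hby, ih _ ht, Ne.symm hby]

theorem pvTotal (i a : Int) : (decide (i ≤ a) || decide (i ≥ a)) = true := by
  simp only [Bool.or_eq_true, decide_eq_true_eq, ge_iff_le]
  omega

theorem pvDetSame (x1 y1 i j : Int) : (x1 * (y1 - j) + x1 * (j - y1) + i * (y1 - y1) == 0) = true := by
  simp only [beq_iff_eq]
  ring

-- the per-pair loops of A and B agree
theorem pvPair (p1 p2 : Int × Int) (R C : Int) (s : PySem.Set (Int × Int)) :
    pyAPairLoop p1 p2 R C s = pyBPairLoop p1 p2 R C s := by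
  obtain ⟨x1, y1⟩ := p1
  obtain ⟨x2, y2⟩ := p2
  unfold pyAPairLoop pyBPairLoop pyIsInLine
  by_cases hy : y1 = y2
  · subst hy
    by_cases hx : x1 = x2
    · subst hx
      simp only [beq_self_eq_true, if_true, pvTotal, pvDetSame]
    · simp only [beq_self_eq_true, if_true, beq_iff_eq, hx, if_false]
      have hdet : ∀ i j : Int, (x1 * (y1 - j) + x2 * (j - y1) + i * (y1 - y1) = 0) ↔ j = y1 := by
        intro i j
        have h : x1 * (y1 - j) + x2 * (j - y1) + i * (y1 - y1) = (x2 - x1) * (j - y1) := by ring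
        rw [h, mul_eq_zero, sub_eq_zero, sub_eq_zero]
        constructor
        · rintro (h1 | h1)
          · exact absurd h1.symm hx
          · exact h1
        · exact Or.inr
      simp only [hdet]
      by_cases hg : (decide (0 ≤ y1) && decide (y1 < C)) = true
      · rw [if_pos hg]
        simp only [Bool.and_eq_true, decide_eq_true_eq] at hg
        congr 1
        funext ant i
        by_cases hc2 : (decide (i ≤ x1) || decide (i ≥ x2)) = true
        · simp only [hc2, if_true]
          rw [pvFoldlAddEq _ _ (fun j => ((i : Int), j)) PySem.Set.add ant (PySem.List.nodup_pyRange_one _ _)]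
          rw [if_pos (PySem.List.mem_pyRange_one.mpr (by omega))]
        · simp only [hc2, Bool.false_eq_true, if_false, pvFoldlId]
      · rw [if_neg hg]
        have hA : (fun (ant : PySem.Set (Int × Int)) (i : Int) =>
            (PySem.List.pyRange 0 C 1).foldl (fun ant j =>
              if (decide (i ≤ x1) || decide (i ≥ x2)) = true then
                if j = y1 then ant.add (i, j) else ant
              else ant) ant) = fun ant _ => ant := by
          funext ant i
          by_cases hc2 : (decide (i ≤ x1) || decide (i ≥ x2)) = true
          · simp only [hc2, if_true]
            rw [pvFoldlAddEq _ _ (fun j => ((i : Int), j)) PySem.Set.add ant (PySem.List.nodup_pyRange_one _ _)]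
            rw [if_neg]
            intro hmem
            rcases PySem.List.mem_pyRange_one.mp hmem with ⟨h1, h2⟩
            exact hg (by simp [h1, h2])
          · simp only [hc2, Bool.false_eq_true, if_false, pvFoldlId]
        rw [hA, pvFoldlId]
  · have hne : (y1 == y2) = false := by simp [hy]
    simp only [hne, Bool.false_eq_true, if_false, beq_iff_eq]
    by_cases hx : x1 = x2
    · subst hx
      simp only [if_true]
      have hdet : ∀ i j : Int, (x1 * (y2 - j) + x1 * (j - y1) + i * (y1 - y2) = 0) ↔ i = x1 := by
        intro i j
        have h : x1 * (y2 - j) + x1 * (j - y1) + i * (y1 - y2) = (y1 - y2) * (i - x1) := by ring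
        rw [h, mul_eq_zero, sub_eq_zero, sub_eq_zero]
        constructor
        · rintro (h1 | h1)
          · exact absurd h1 hy
          · exact h1
        · exact Or.inr
      simp only [hdet]
      have hA : (fun (ant : PySem.Set (Int × Int)) (i : Int) =>
          (PySem.List.pyRange 0 C 1).foldl (fun ant j =>
            if (decide (j ≤ y1) || decide (j ≥ y2)) = true then
              if i = x1 then ant.add (i, j) else ant
            else ant) ant)
          = fun (ant : PySem.Set (Int × Int)) (i : Int) =>
            if i = x1 then
              (PySem.List.pyRange 0 C 1).foldl (fun ant j =>
                if (decide (j ≤ y1) || decide (j ≥ y2)) = true then ant.add (x1, j) else ant) ant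
            else ant := by
        funext ant i
        by_cases hi : i = x1
        · subst hi
          simp only [if_true]
        · simp only [hi, if_false, ite_self, pvFoldlId]
      rw [hA, pvFoldlSingle (PySem.List.pyRange 0 R) x1
        (fun t => (PySem.List.pyRange 0 C 1).foldl (fun ant j =>
          if (decide (j ≤ y1) || decide (j ≥ y2)) = true then ant.add (x1, j) else ant) t) s
        (PySem.List.nodup_pyRange_one _ _)]
      by_cases hg : 0 ≤ x1 ∧ x1 < R
      · rw [if_pos (PySem.List.mem_pyRange_one.mpr hg), if_pos (by simp [hg.1, hg.2])]
      · rw [if_neg (fun hm => hg (PySem.List.mem_pyRange_one.mp hm)),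
          if_neg (by simp only [Bool.and_eq_true, decide_eq_true_eq]; exact fun h => hg ⟨h.1, h.2⟩)]
    · simp only [hx, if_false]
      have hden : (x2 - x1) ≠ 0 := sub_ne_zero.mpr (Ne.symm hx)
      have key : ∀ i j : Int, (x1 * (y2 - j) + x2 * (j - y1) + i * (y1 - y2) = 0) ↔
          (PySem.Int.mod (x2 * y1 - x1 * y2 - i * (y1 - y2)) (x2 - x1) = 0 ∧
            j = PySem.Int.floordiv (x2 * y1 - x1 * y2 - i * (y1 - y2)) (x2 - x1)) := by
        intro i j
        have hexpr : x1 * (y2 - j) + x2 * (j - y1) + i * (y1 - y2)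
            = j * (x2 - x1) - (x2 * y1 - x1 * y2 - i * (y1 - y2)) := by ring
        rw [hexpr, sub_eq_zero]
        constructor
        · intro h
          have hdvd : (x2 - x1) ∣ (x2 * y1 - x1 * y2 - i * (y1 - y2)) := ⟨j, by rw [← h]; ring⟩
          have hm0 : PySem.Int.mod (x2 * y1 - x1 * y2 - i * (y1 - y2)) (x2 - x1) = 0 :=
            (PySem.Int.mod_eq_zero_iff_dvd _ _).mpr hdvd
          refine ⟨hm0, ?_⟩
          have hq := PySem.Int.floordiv_mul_add_mod (x2 * y1 - x1 * y2 - i * (y1 - y2)) (x2 - x1)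
          rw [hm0, add_zero] at hq
          exact mul_right_cancel₀ hden (h.trans hq.symm)
        · rintro ⟨hm0, rfl⟩
          have hq := PySem.Int.floordiv_mul_add_mod (x2 * y1 - x1 * y2 - i * (y1 - y2)) (x2 - x1)
          rw [hm0, add_zero] at hq
          exact hq
      simp only [key]
      have hA : ∀ (ant : PySem.Set (Int × Int)) (i : Int),
          (PySem.List.pyRange 0 C 1).foldl (fun ant j =>
            if (decide (j ≤ y1) || decide (j ≥ y2)) = true then
              if (PySem.Int.mod (x2 * y1 - x1 * y2 - i * (y1 - y2)) (x2 - x1) = 0 ∧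
                  j = PySem.Int.floordiv (x2 * y1 - x1 * y2 - i * (y1 - y2)) (x2 - x1)) then
                ant.add (i, j)
              else ant
            else ant) ant
          = (if PySem.Int.mod (x2 * y1 - x1 * y2 - i * (y1 - y2)) (x2 - x1) = 0 then
              if (decide (0 ≤ PySem.Int.floordiv (x2 * y1 - x1 * y2 - i * (y1 - y2)) (x2 - x1)) &&
                    decide (PySem.Int.floordiv (x2 * y1 - x1 * y2 - i * (y1 - y2)) (x2 - x1) < C) &&
                  (decide (PySem.Int.floordiv (x2 * y1 - x1 * y2 - i * (y1 - y2)) (x2 - x1) ≤ y1) ||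
                    decide (PySem.Int.floordiv (x2 * y1 - x1 * y2 - i * (y1 - y2)) (x2 - x1) ≥ y2))) = true then
                ant.add (i, PySem.Int.floordiv (x2 * y1 - x1 * y2 - i * (y1 - y2)) (x2 - x1))
              else ant
            else ant) := by
        intro ant i
        set q : Int := PySem.Int.floordiv (x2 * y1 - x1 * y2 - i * (y1 - y2)) (x2 - x1) with hqdef
        by_cases hm : PySem.Int.mod (x2 * y1 - x1 * y2 - i * (y1 - y2)) (x2 - x1) = 0
        · simp only [hm, true_and, if_true]
          have hb : ∀ (ant : PySem.Set (Int × Int)) (j : Int),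
              (if (decide (j ≤ y1) || decide (j ≥ y2)) = true then
                if j = q then PySem.Set.add ant (i, j) else ant
              else ant)
              = (if j = q then
                  (if (decide (q ≤ y1) || decide (q ≥ y2)) = true then PySem.Set.add ant (i, j) else ant)
                else ant) := by
            intro ant j
            by_cases hj : j = q
            · subst hj
              by_cases hf : (decide (q ≤ y1) || decide (q ≥ y2)) = true <;> simp [hf]
            · simp [hj, ite_self]
          simp only [hb]
          rw [pvFoldlAddEq (PySem.List.pyRange 0 C) q (fun j => ((i : Int), j))
            (fun t v => if (decide (q ≤ y1) || decide (q ≥ y2)) = true then PySem.Set.add t v else t)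
            ant (PySem.List.nodup_pyRange_one _ _)]
          by_cases h1 : 0 ≤ q ∧ q < C
          · rw [if_pos (PySem.List.mem_pyRange_one.mpr h1)]
            have hg2 : (decide (0 ≤ q) && decide (q < C) && (decide (q ≤ y1) || decide (q ≥ y2)))
                = (decide (q ≤ y1) || decide (q ≥ y2)) := by
              simp [h1.1, h1.2]
            rw [hg2]
          · rw [if_neg (fun hm2 => h1 (PySem.List.mem_pyRange_one.mp hm2))]
            have hg2 : (decide (0 ≤ q) && decide (q < C) && (decide (q ≤ y1) || decide (q ≥ y2)))
                = false := by
              rcases not_and_or.mp h1 with h | h <;> simp [h]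
            rw [hg2]
            simp
        · simp only [hm, false_and, if_false, ite_self, pvFoldlId]
      simp only [hA]

-- ===== VERDICT (by name: the statement is the Claim_ definition above) =====
theorem get_antonode_positions_spec : Claim_equal_get_antonode_positions := by
  intro positions R C _
  unfold Spec_get_antonode_positions get_antonode_positions get_antonode_positions_alt
  simp only [pvPair]
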